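-- pv_equiv track=rewrite | github.com/henrisalles1/HBank | dirConta/Senha.py | senha_igual
-- ===== SOURCE A (Python) =====
-- def senha_igual(senha):
--     d = []
--     for digito in senha:
--         d.append(digito)
--     if len(set(d)) == 1:
--         return False
--     else:
--         return True
-- ===== SOURCE B (Python) =====
-- def senha_igual(senha):
--     for digito in senha:
--         if digito != senha[0]:
--             return True
--     return len(senha) == 0
-- ===== Notes on version B (the rewrite author's own statement) =====
-- stated objective: simpler
-- what changed: B drops the list copy and the set: it scans once comparing each character with the first and short-circuits to True on the first difference, returning len==0 when no difference is found (so the empty string stays True).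
import Mathlib
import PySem

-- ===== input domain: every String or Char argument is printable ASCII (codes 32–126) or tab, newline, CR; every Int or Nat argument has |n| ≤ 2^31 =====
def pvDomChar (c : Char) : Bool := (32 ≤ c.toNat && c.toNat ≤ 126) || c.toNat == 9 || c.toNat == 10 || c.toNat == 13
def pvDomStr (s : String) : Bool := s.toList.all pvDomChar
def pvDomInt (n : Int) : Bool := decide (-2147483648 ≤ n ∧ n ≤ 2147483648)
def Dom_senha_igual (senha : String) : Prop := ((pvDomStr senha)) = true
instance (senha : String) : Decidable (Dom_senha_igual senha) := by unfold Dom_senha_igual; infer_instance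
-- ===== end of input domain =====

-- B replaces A's list copy + set cardinality by a single early-exit scan against the first character.

-- ===== PORT A =====
def senha_igual (senha : String) : Bool :=
  let d : List Char := senha.toList.foldl (fun acc c => acc ++ [c]) []
  if PySem.Set.len (PySem.Set.ofList d) == 1 then false else true

-- ===== PORT B =====
def senha_igual_altLoop (first : Char) : List Char → Bool
  | [] => false
  | c :: cs => if c ≠ first then true else senha_igual_altLoop first cs

def senha_igual_alt (senha : String) : Bool :=
  match senha.toList with
  | [] => true                               -- loop never runs; len(senha) == 0
  | c :: cs => senha_igual_altLoop c (c :: cs)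

-- ===== PRECONDITION & SPEC =====
def Spec_senha_igual (senha : String) (out : Bool) : Prop := out = senha_igual_alt senha
instance (senha : String) (out : Bool) : Decidable (Spec_senha_igual senha out) := by unfold Spec_senha_igual; infer_instance

-- ===== CLAIM (what is proved, stated in full; the proofs are below) =====
def Claim_equal_senha_igual : Prop := ∀ (senha : String), Dom_senha_igual senha → Spec_senha_igual senha (senha_igual senha)

-- ===== LEMMAS AND PROOFS =====
theorem pv_foldl_append (l : List Char) (acc : List Char) :
    l.foldl (fun a c => a ++ [c]) acc = acc ++ l := by
  induction l generalizing acc with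
  | nil => simp
  | cons c cs ih => simp [List.foldl, ih]

theorem pv_altLoop_any (first : Char) (l : List Char) :
    senha_igual_altLoop first l = l.any (fun c => c ≠ first) := by
  induction l with
  | nil => rfl
  | cons c cs ih =>
    by_cases h : c = first <;> simp [senha_igual_altLoop, h, ih]

theorem pv_ofList_const (c : Char) (cs : List Char) (h : ∀ x ∈ cs, x = c) :
    PySem.Set.ofList (c :: cs) = [c] := by
  rw [PySem.Set.ofList_eq_foldl]
  simp only [List.foldl]
  have : PySem.Set.add ([] : PySem.Set Char) c = [c] := rfl
  rw [this]
  induction cs with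
  | nil => rfl
  | cons x xs ih =>
    have hx : x = c := h x (by simp)
    have : PySem.Set.add [c] x = [c] := by
      subst hx; simp [PySem.Set.add, PySem.Set.contains]
    simp only [List.foldl, this]
    exact ih (fun y hy => h y (by simp [hy]))

theorem pv_len_one_iff (c : Char) (cs : List Char) :
    (PySem.Set.ofList (c :: cs)).length = 1 ↔ ∀ x ∈ cs, x = c := by
  constructor
  · intro h
    obtain ⟨a, ha⟩ := List.length_eq_one_iff.mp h
    have hc : c ∈ PySem.Set.ofList (c :: cs) := by
      rw [PySem.Set.mem_ofList]; simp
    rw [ha] at hc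
    have hac : c = a := by simpa using hc
    intro x hx
    have : x ∈ PySem.Set.ofList (c :: cs) := by
      rw [PySem.Set.mem_ofList]; simp [hx]
    rw [ha, ← hac] at this
    simpa using this
  · intro h
    rw [pv_ofList_const c cs h]; rfl

-- ===== VERDICT (by name: the statement is the Claim_ definition above) =====
theorem senha_igual_spec : Claim_equal_senha_igual := by
  intro senha _
  unfold Spec_senha_igual senha_igual senha_igual_alt
  rw [pv_foldl_append]
  simp only [List.nil_append]
  cases h : senha.toList with
  | nil => rfl
  | cons c cs =>
    show _ = senha_igual_altLoop c (c :: cs)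
    rw [pv_altLoop_any]
    rcases Bool.eq_false_or_eq_true ((c :: cs).any (fun x => x ≠ c)) with hany1 | hany0
    · obtain ⟨x, hx, hxc⟩ := List.any_eq_true.mp hany1
      have hxc' : x ≠ c := by simpa using hxc
      have hxcs : x ∈ cs := by
        rcases List.mem_cons.mp hx with rfl | h
        · exact absurd rfl hxc'
        · exact h
      have h1 : (PySem.Set.ofList (c :: cs)).length ≠ 1 :=
        fun hlen => hxc' ((pv_len_one_iff c cs).mp hlen x hxcs)
      rw [hany1]
      simp [PySem.Set.len, h1]
    · have hall : ∀ x ∈ cs, x = c := by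
        intro x hx
        have := List.any_eq_false.mp hany0 x (by simp [hx])
        simpa using this
      have h1 : (PySem.Set.ofList (c :: cs)).length = 1 := (pv_len_one_iff c cs).mpr hall
      rw [hany0]
      simp [PySem.Set.len, h1]
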